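-- pv_equiv track=rewrite | github.com/ferlautaro2001/Fernandez.Lautaro.PrimerParcial | normalizacion.py | normalizar_empresas
-- ===== SOURCE A (Python) =====
-- def normalizar_empresas(empresa: str) -> str:
--     """
--     Convierte el nombre de una empresa a mayúsculas sin usar métodos de cadena.
--
--     Args:
--         empresa (str): Nombre de la empresa a normalizar.
--
--     Comportamiento:
--     - Recorre cada carácter de la cadena `empresa`.
--     - Convierte caracteres en minúscula ('a' - 'z') a mayúscula restando 32 en su código ASCII.
--     - Si el carácter ya está en mayúscula, lo mantiene sin cambios.
--     - Construye y retorna el nombre normalizado.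
--
--     Retorno:
--     - (str): Nombre de la empresa con todas las letras en mayúsculas.
--     """
--     nombre_normalizado = ""
--     if empresa:
--         for i in range(len(empresa)):
--             caracter_ascii = ord(empresa[i])
--             if ord('a') <= caracter_ascii <= ord('z'):
--                 nombre_normalizado += chr(caracter_ascii - 32)
--             else:
--                 nombre_normalizado += empresa[i]
--     return nombre_normalizado
-- ===== SOURCE B (Python) =====
-- def normalizar_empresas(empresa: str) -> str:
--     tabla = {c: c - 32 for c in range(ord('a'), ord('z') + 1)}
--     return empresa.translate(tabla)
-- ===== Notes on version B (the rewrite author's own statement) =====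
-- stated objective: faster
-- what changed: Replaces the explicit per-index loop with conditional ASCII arithmetic and repeated string concatenation by a precomputed a-z to A-Z translation table applied in one str.translate pass.
import Mathlib
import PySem

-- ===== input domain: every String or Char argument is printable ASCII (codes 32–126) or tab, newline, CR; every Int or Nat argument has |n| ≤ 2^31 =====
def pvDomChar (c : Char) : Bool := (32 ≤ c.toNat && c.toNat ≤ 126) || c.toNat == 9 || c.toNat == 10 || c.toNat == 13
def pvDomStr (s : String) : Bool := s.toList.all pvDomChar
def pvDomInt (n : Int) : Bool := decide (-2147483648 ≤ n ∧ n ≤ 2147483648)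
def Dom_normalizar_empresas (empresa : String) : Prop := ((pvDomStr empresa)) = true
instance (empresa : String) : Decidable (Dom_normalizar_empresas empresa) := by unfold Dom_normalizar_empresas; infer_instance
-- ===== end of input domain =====

-- B replaces A's per-index loop (conditional ASCII arithmetic + string concatenation) by a
-- precomputed a→A translation table applied in a single translate pass (idiomatic).

-- ===== PORT A =====
-- A: for i in range(len(empresa)): test ord, append chr(code-32) or the char itself
def normalizar_empresas (empresa : String) : String :=
  let cs := empresa.toList
  let res : List Char :=
    if cs.isEmpty then []
    else
      (PySem.List.pyRange 0 (PySem.List.len cs) 1).foldl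
        (fun acc i =>
          let c := PySem.List.pyGetD cs i ' '
          let code : Int := (c.toNat : Int)
          if 97 ≤ code ∧ code ≤ 122 then acc ++ [Char.ofNat (code - 32).toNat]
          else acc ++ [c])
        []
  String.ofList res

-- ===== PORT B =====
-- B: the translation table {ord 'a'..ord 'z' ↦ code - 32}, then one translate pass
def nzTabla : PySem.Dict Int Int :=
  (PySem.List.pyRange 97 123 1).foldl (fun d c => d.insert c (c - 32)) PySem.Dict.empty

def nzTranslate (t : PySem.Dict Int Int) (c : Char) : Char :=
  match t.get? (c.toNat : Int) with
  | some v => Char.ofNat v.toNat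
  | none => c

def normalizar_empresas_alt (empresa : String) : String :=
  String.ofList (empresa.toList.map (nzTranslate nzTabla))

-- ===== PRECONDITION & SPEC =====
def Spec_normalizar_empresas (empresa : String) (out : String) : Prop := out = normalizar_empresas_alt empresa
instance (empresa : String) (out : String) : Decidable (Spec_normalizar_empresas empresa out) := by unfold Spec_normalizar_empresas; infer_instance

-- ===== CLAIM (what is proved, stated in full; the proofs are below) =====
def Claim_equal_normalizar_empresas : Prop := ∀ (empresa : String), Dom_normalizar_empresas empresa → Spec_normalizar_empresas empresa (normalizar_empresas empresa)

-- ===== LEMMAS AND PROOFS =====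

-- A's per-character transformation
def nzStep (c : Char) : Char :=
  if 97 ≤ (c.toNat : Int) ∧ (c.toNat : Int) ≤ 122 then Char.ofNat (((c.toNat : Int) - 32)).toNat else c

-- on every in-domain character the two per-character functions agree (127 codes, checked by kernel evaluation)
set_option maxRecDepth 4096 in
lemma nzStep_eq_translate (c : Char) (h : pvDomChar c = true) : nzStep c = nzTranslate nzTabla c := by
  have hall : ∀ m : Fin 127, nzStep (Char.ofNat m.val) = nzTranslate nzTabla (Char.ofNat m.val) := by decide
  have hle : c.toNat < 127 := by
    simp [pvDomChar] at h
    omega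
  have := hall ⟨c.toNat, hle⟩
  simpa [Char.ofNat_toNat] using this

theorem normalizar_empresas_spec : Claim_equal_normalizar_empresas := by
  intro empresa hdom
  unfold Spec_normalizar_empresas normalizar_empresas normalizar_empresas_alt
  simp only []
  by_cases hnil : empresa.toList.isEmpty
  · simp [List.isEmpty_iff.mp hnil]
  · simp only [hnil]
    rw [PySem.List.foldl_pyRange_zero_pyGetD empresa.toList ' '
          (fun acc c => if 97 ≤ (c.toNat : Int) ∧ (c.toNat : Int) ≤ 122
                        then acc ++ [Char.ofNat (((c.toNat : Int) - 32)).toNat] else acc ++ [c]) []]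
    have hfold : ∀ (l : List Char), l.all pvDomChar = true → ∀ acc : List Char,
        l.foldl (fun acc c => if 97 ≤ (c.toNat : Int) ∧ (c.toNat : Int) ≤ 122
                        then acc ++ [Char.ofNat (((c.toNat : Int) - 32)).toNat] else acc ++ [c]) acc
          = acc ++ l.map (nzTranslate nzTabla) := by
      intro l hl
      induction l with
      | nil => intro acc; simp
      | cons c t ih =>
        intro acc
        simp only [List.all_cons, Bool.and_eq_true] at hl
        have hc := nzStep_eq_translate c hl.1
        simp only [List.foldl_cons, List.map_cons]
        rw [ih hl.2]
        by_cases hcase : 97 ≤ ((c.toNat : Int)) ∧ ((c.toNat : Int)) ≤ 122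
        · rw [if_pos hcase]
          have hx : Char.ofNat (((c.toNat : Int) - 32)).toNat = nzTranslate nzTabla c := by
            rw [← hc]; unfold nzStep; rw [if_pos hcase]
          rw [hx]; simp
        · rw [if_neg hcase]
          have hx : c = nzTranslate nzTabla c := by
            rw [← hc]; unfold nzStep; rw [if_neg hcase]
          rw [← hx]; simp
    have hd : empresa.toList.all pvDomChar = true := hdom
    rw [hfold empresa.toList hd []]
    simp
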